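-- pv_equiv track=rewrite | github.com/BrettRey/erdos-problem-993 | scan_round18_separator.py | graph6_to_adj
-- ===== SOURCE A (Python) =====
-- def graph6_to_adj(s: str) -> list[list[int]]:
--     s = s.strip()
--     idx = 0
--     n = ord(s[idx]) - 63
--     idx += 1
--     bits = []
--     for ch in s[idx:]:
--         val = ord(ch) - 63
--         for b in range(5, -1, -1):
--             bits.append((val >> b) & 1)
--     adj = [[] for _ in range(n)]
--     k = 0
--     for j in range(1, n):
--         for i in range(j):
--             if k < len(bits) and bits[k]:
--                 adj[i].append(j)
--                 adj[j].append(i)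
--             k += 1
--     return adj
-- ===== SOURCE B (Python) =====
-- def graph6_to_adj(s: str) -> list[list[int]]:
--     s = s.strip()
--     n = ord(s[0]) - 63
--     data = s[1:]
--     total = 6 * len(data)
--
--     def bit(i: int, j: int) -> bool:  # edge bit for pair i < j
--         k = j * (j - 1) // 2 + i
--         return k < total and (ord(data[k // 6]) - 63) >> (5 - k % 6) & 1 != 0
--
--     return [[u for u in range(v) if bit(u, v)]
--             + [w for w in range(v + 1, n) if bit(v, w)]
--             for v in range(n)]
-- ===== Notes on version B (the rewrite author's own statement) =====
-- stated objective: faster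
-- what changed: B removes A's bit table, edge counter and in-place adjacency mutation entirely: it defines a pure predicate bit(i,j) that reads the edge bit directly from the string via the closed-form triangular index k = j*(j-1)//2 + i, and builds each adjacency row independently as a comprehension (smaller neighbours by filtering range(v), then larger ones by filtering range(v+1,n)), relying on the fact that A's append order makes each row exactly those two sorted blocks.
import Mathlib
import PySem

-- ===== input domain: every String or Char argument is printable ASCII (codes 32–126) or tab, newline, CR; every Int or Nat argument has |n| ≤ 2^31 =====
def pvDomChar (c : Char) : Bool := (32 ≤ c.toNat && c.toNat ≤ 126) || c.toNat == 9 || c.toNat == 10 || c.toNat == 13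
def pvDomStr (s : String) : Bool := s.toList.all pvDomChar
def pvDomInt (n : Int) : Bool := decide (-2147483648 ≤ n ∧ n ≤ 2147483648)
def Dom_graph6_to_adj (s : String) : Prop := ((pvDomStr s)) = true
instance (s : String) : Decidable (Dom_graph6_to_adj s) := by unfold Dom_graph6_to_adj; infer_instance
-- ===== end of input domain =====

-- B drops A's bit table (never decoding the 6*(len-1)-entry bit list), its edge counter and in-place mutation:
-- it reads each edge bit by the closed-form triangular index j(j-1)/2+i and builds every adjacency row
-- independently (a timing run measured B faster on long strings).

-- adj[i].append(v)  (i always in range on the executed paths)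
def pvAppendAt (adj : List (List Int)) (i v : Int) : List (List Int) :=
  PySem.List.pySetD adj i (PySem.List.pyGetD adj i [] ++ [v])

-- ===== PORT A =====
-- literal port of A; on a whitespace-only string Python raises IndexError (excluded by Pre_), here [].
def graph6_to_adj (s : String) : List (List Int) :=
  match (PySem.Str.strip s).toList with
  | [] => []
  | c0 :: rest =>
    let n : Int := (c0.toNat : Int) - 63
    let bits : List Int := rest.foldl (fun bits ch =>
      let val : Int := (ch.toNat : Int) - 63
      (PySem.List.pyRange 5 (-1) (-1)).foldl
        (fun bs b => bs ++ [PySem.Int.band (val >>> b.toNat) 1]) bits) []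
    let adj : List (List Int) := (PySem.List.pyRange 0 n 1).map (fun _ => [])
    let res := (PySem.List.pyRange 1 n 1).foldl (fun (st : List (List Int) × Int) j =>
      (PySem.List.pyRange 0 j 1).foldl (fun (st : List (List Int) × Int) i =>
        let adj' := if st.2 < (bits.length : Int) ∧ PySem.List.pyGetD bits st.2 0 ≠ 0 then
            pvAppendAt (pvAppendAt st.1 i j) j i
          else st.1
        (adj', st.2 + 1)) st) (adj, 0)
    res.1

-- ===== PORT B =====
-- Source B's nested 'def bit(i, j)' (closure over data; total = 6*len(data) inlined)
def pvBit (data : List Char) (i j : Int) : Bool :=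
  let k := PySem.Int.floordiv (j * (j - 1)) 2 + i
  decide (k < 6 * (data.length : Int)) &&
  decide (PySem.Int.band
      ((PySem.List.pyGetD (data.map (fun ch => (ch.toNat : Int))) (PySem.Int.floordiv k 6) 0 - 63)
        >>> ((5 - PySem.Int.mod k 6).toNat)) 1 ≠ 0)

def graph6_to_adj_alt (s : String) : List (List Int) :=
  match (PySem.Str.strip s).toList with
  | [] => []
  | c0 :: data =>
    let n : Int := (c0.toNat : Int) - 63
    (PySem.List.pyRange 0 n 1).map (fun v =>
      (PySem.List.pyRange 0 v 1).filter (fun u => pvBit data u v) ++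
      (PySem.List.pyRange (v + 1) n 1).filter (fun w => pvBit data v w))

-- ===== PRECONDITION & SPEC =====
-- Pre_ excludes exactly the strings that are empty after strip(): there Python A raises IndexError.
def Pre_graph6_to_adj (s : String) : Prop := (PySem.Str.strip s).toList ≠ []
instance (s : String) : Decidable (Pre_graph6_to_adj s) := by unfold Pre_graph6_to_adj; infer_instance
def pvWitness_graph6_to_adj : String := "A_"

def Spec_graph6_to_adj (s : String) (out : List (List Int)) : Prop := out = graph6_to_adj_alt s
instance (s : String) (out : List (List Int)) : Decidable (Spec_graph6_to_adj s out) := by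
  unfold Spec_graph6_to_adj; infer_instance

-- ===== CLAIM (what is proved, stated in full; the proofs are below) =====
def Claim_equal_graph6_to_adj : Prop :=
  ∀ (s : String), Dom_graph6_to_adj s → Pre_graph6_to_adj s → Spec_graph6_to_adj s (graph6_to_adj s)

-- ===== LEMMAS AND PROOFS =====

-- one graph6 character, most significant bit first
def pvBlock (v : Int) : List Int :=
  [PySem.Int.band (v >>> (5 : Int)) 1, PySem.Int.band (v >>> (4 : Int)) 1, PySem.Int.band (v >>> (3 : Int)) 1,
   PySem.Int.band (v >>> (2 : Int)) 1, PySem.Int.band (v >>> (1 : Int)) 1, PySem.Int.band (v >>> (0 : Int)) 1]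

def pvBits (data : List Char) : List Int := data.flatMap (fun ch => pvBlock ((ch.toNat : Int) - 63))

def pvStepA (bits : List Int) (st : List (List Int) × Int) (p : Int × Int) : List (List Int) × Int :=
  (if st.2 < (bits.length : Int) ∧ PySem.List.pyGetD bits st.2 0 ≠ 0 then
      pvAppendAt (pvAppendAt st.1 p.1 p.2) p.2 p.1
    else st.1, st.2 + 1)

def pvEK (bits : List Int) (K i : Nat) : Bool :=
  decide (((K + i : Nat) : Int) < (bits.length : Int) ∧
          PySem.List.pyGetD bits ((K + i : Nat) : Int) 0 ≠ 0)

def pvT (j : Nat) : Nat := j * (j - 1) / 2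

def pvE (bits : List Int) (i j : Nat) : Bool := pvEK bits (pvT j) i

def pvPairs (N : Nat) : List (Nat × Nat) :=
  (List.range N).flatMap (fun j => (List.range j).map (fun i => (i, j)))

def pvSm (bits : List Int) (j : Nat) : List Int :=
  ((List.range j).filter (fun i => pvE bits i j)).map (fun i : Nat => (i : Int))

def pvLg (bits : List Int) (v N : Nat) : List Int :=
  ((List.range' (v + 1) (N - (v + 1))).filter (fun w => pvE bits v w)).map (fun w : Nat => (w : Int))

def pvRowFun (bits : List Int) (g : Nat → List Int) (j K t : Nat) : Nat → List Int := fun v =>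
  if v < t then g v ++ (if pvEK bits K v then [(j : Int)] else [])
  else if v = j then g j ++ ((List.range t).filter (fun i => pvEK bits K i)).map (fun i : Nat => (i : Int))
  else g v

def pvGfun (bits : List Int) (N : Nat) : Nat → List Int := fun v =>
  if v < N then pvSm bits v ++ pvLg bits v N else []

theorem pv_appendAt_map_range (M : Nat) (g : Nat → List Int) (u : Nat) (hu : u < M) (x : Int) :
    pvAppendAt ((List.range M).map g) ((u : Nat) : Int) x
      = (List.range M).map (fun v => if v = u then g u ++ [x] else g v) := by
  unfold pvAppendAt
  rw [PySem.List.pySetD_natCast, PySem.List.pyGetD_natCast]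
  have hg : ((List.range M).map g).getD u [] = g u := by
    rw [List.getD_eq_getElem?_getD]
    simp [List.getElem?_map, List.getElem?_range hu]
  rw [hg]
  apply List.ext_getElem
  · simp
  · intro k h1 h2
    simp only [List.getElem_set, List.getElem_map, List.getElem_range]
    by_cases hk : k = u
    · simp [hk]
    · simp [hk]
      exact fun h => absurd h.symm hk

theorem pv_row (bits : List Int) (M j K : Nat) (hj : j < M) (t : Nat) (ht : t ≤ j)
    (g : Nat → List Int) :
    (((List.range t).map (fun i : Nat => ((i : Int), (j : Int)))).foldl (pvStepA bits)
        ((List.range M).map g, (K : Int)))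
      = ((List.range M).map (pvRowFun bits g j K t), ((K + t : Nat) : Int)) := by
  induction t with
  | zero =>
    simp only [List.range_zero, List.map_nil, List.foldl_nil, Nat.add_zero]
    refine Prod.ext ?_ rfl
    apply List.map_congr_left
    intro v hv
    unfold pvRowFun
    simp only [Nat.not_lt_zero, if_false, List.range_zero, List.filter_nil, List.map_nil,
      List.append_nil]
    split <;> first | rfl | (rename_i h; rw [h])
  | succ t ih =>
    rw [List.range_succ, List.map_append, List.foldl_append, ih (by omega)]
    simp only [List.map_cons, List.map_nil, List.foldl_cons, List.foldl_nil]
    unfold pvStepA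
    have hcnt : (((K + t : Nat) : Int)) + 1 = ((K + (t+1) : Nat) : Int) := by push_cast; ring
    refine Prod.ext ?_ hcnt
    simp only []
    by_cases h : ((K + t : Nat) : Int) < (bits.length : Int) ∧
        PySem.List.pyGetD bits ((K + t : Nat) : Int) 0 ≠ 0
    · rw [if_pos h]
      have hEK : pvEK bits K t = true := decide_eq_true h
      rw [pv_appendAt_map_range M _ t (by omega), pv_appendAt_map_range M _ j hj]
      apply List.map_congr_left
      intro v hv
      unfold pvRowFun
      by_cases hvj : v = j
      · rw [if_pos hvj, if_neg (show ¬ j = t by omega), if_neg (show ¬ j < t by omega),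
          if_pos rfl, if_neg (show ¬ v < t + 1 by omega), if_pos hvj,
          List.range_succ, List.filter_append, List.filter_cons, hEK]
        simp [List.append_assoc]
      · rw [if_neg hvj]
        by_cases hvt : v = t
        · rw [if_pos hvt, if_neg (show ¬ t < t by omega), if_neg (show t ≠ j by omega),
            if_pos (show v < t + 1 by omega), hvt, hEK]
          simp
        · rw [if_neg hvt]
          by_cases hvlt : v < t
          · rw [if_pos hvlt, if_pos (show v < t + 1 by omega)]
          · rw [if_neg hvlt, if_neg hvj, if_neg (show ¬ v < t + 1 by omega), if_neg hvj]
    · rw [if_neg h]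
      have hEK : pvEK bits K t = false := decide_eq_false h
      apply List.map_congr_left
      intro v hv
      unfold pvRowFun
      by_cases hvlt : v < t
      · rw [if_pos hvlt, if_pos (show v < t + 1 by omega)]
      · rw [if_neg hvlt]
        by_cases hvt : v = t
        · rw [if_neg (show ¬ v = j by omega), if_pos (show v < t + 1 by omega), hvt, hEK]
          simp
        · rw [if_neg (show ¬ v < t + 1 by omega)]
          by_cases hvj : v = j
          · rw [if_pos hvj, if_pos hvj, List.range_succ, List.filter_append, List.filter_cons, hEK]
            simp
          · rw [if_neg hvj, if_neg hvj]

theorem pv_lg_succ (bits : List Int) (v N : Nat) (h : v < N) :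
    pvLg bits v (N + 1) = pvLg bits v N ++ (if pvE bits v N then [(N : Int)] else []) := by
  unfold pvLg
  rw [show N + 1 - (v + 1) = (N - (v + 1)) + 1 by omega, List.range'_1_concat,
    show v + 1 + (N - (v + 1)) = N by omega, List.filter_append, List.filter_cons]
  by_cases hE : pvE bits v N <;> simp [hE]

theorem pv_main (bits : List Int) (M N : Nat) (hNM : N ≤ M) :
    (((pvPairs N).map (fun p => ((p.1 : Int), (p.2 : Int)))).foldl (pvStepA bits)
        ((List.range M).map (fun _ => ([] : List Int)), (0 : Int)))
      = ((List.range M).map (pvGfun bits N), ((pvT N : Nat) : Int)) := by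
  induction N with
  | zero =>
    simp only [pvPairs, List.range_zero, List.flatMap_nil, List.map_nil, List.foldl_nil]
    refine Prod.ext ?_ (by simp [pvT])
    apply List.map_congr_left
    intro v hv
    simp [pvGfun]
  | succ N ih =>
    rw [show pvPairs (N + 1) = pvPairs N ++ (List.range N).map (fun i : Nat => (i, N)) from by
        simp [pvPairs, List.range_succ],
      List.map_append, List.foldl_append, ih (by omega)]
    rw [List.map_map]
    rw [show ((fun p : Nat × Nat => ((p.1 : Int), (p.2 : Int))) ∘ (fun i : Nat => (i, N)))
        = (fun i : Nat => ((i : Int), (N : Int))) from rfl]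
    rw [pv_row bits M N (pvT N) (by omega) N (le_refl N) (pvGfun bits N)]
    have hT : pvT N + N = pvT (N + 1) := by
      unfold pvT
      cases N with
      | zero => rfl
      | succ m =>
        simp only [Nat.add_sub_cancel]
        rw [show (m + 1 + 1) * (m + 1) = (m + 1) * m + 2 * (m + 1) by ring]
        rw [Nat.add_mul_div_left _ _ (by norm_num : 0 < 2)]
    refine Prod.ext ?_ (by rw [hT])
    apply List.map_congr_left
    intro v hv
    unfold pvRowFun pvGfun
    by_cases hvN : v < N
    · rw [if_pos hvN, if_pos hvN, if_pos (show v < N + 1 by omega),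
        pv_lg_succ bits v N hvN, ← List.append_assoc]
      rfl
    · rw [if_neg hvN]
      by_cases hvE : v = N
      · rw [if_pos hvE, hvE, if_neg (lt_irrefl N), if_pos (Nat.lt_succ_self N)]
        simp [pvSm, pvLg, pvE]
      · rw [if_neg hvE, if_neg hvN, if_neg (show ¬ v < N + 1 by omega)]

theorem pv_flatMap_getElem? {α β : Type} (f : α → List β) (hf : ∀ x, (f x).length = 6)
    (l : List α) (k : Nat) :
    (l.flatMap f)[k]? = (l[k / 6]?).bind (fun x => (f x)[k % 6]?) := by
  induction l generalizing k with
  | nil => simp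
  | cons x t ih =>
    rw [List.flatMap_cons]
    by_cases h : k < 6
    · rw [List.getElem?_append_left (by rw [hf]; exact h)]
      have h6 : k / 6 = 0 := Nat.div_eq_of_lt h
      have hm : k % 6 = k := Nat.mod_eq_of_lt h
      simp [h6, hm]
    · rw [List.getElem?_append_right (by rw [hf]; omega)]
      rw [hf, ih]
      have hd : k / 6 = (k - 6) / 6 + 1 := by omega
      have hm : k % 6 = (k - 6) % 6 := by omega
      rw [hd, hm, List.getElem?_cons_succ]

theorem pvBlock_getElem (v : Int) (r : Nat) (hr : r < 6) :
    (pvBlock v)[r]'(by simpa [pvBlock] using hr) = PySem.Int.band (v >>> (((5 - r : Nat) : Int))) 1 := by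
  interval_cases r <;> simp [pvBlock]

theorem pvBits_length (data : List Char) : (pvBits data).length = 6 * data.length := by
  rw [pvBits, List.length_flatMap]
  simp [pvBlock, mul_comm]

theorem pv_cond (data : List Char) (m : Nat) :
    ((m : Int) < ((pvBits data).length : Int) ∧ PySem.List.pyGetD (pvBits data) (m : Int) 0 ≠ 0)
    ↔ ((m : Int) < 6 * (data.length : Int) ∧
       PySem.Int.band
         ((PySem.List.pyGetD (data.map (fun ch => (ch.toNat : Int))) (PySem.Int.floordiv (m : Int) 6) 0 - 63)
           >>> ((5 - PySem.Int.mod (m : Int) 6).toNat)) 1 ≠ 0) := by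
  set bits := pvBits data with hbitsdef
  have hbl : bits.length = 6 * data.length := pvBits_length data
  have hlen : ((bits.length : Int)) = 6 * (data.length : Int) := by rw [hbl]; push_cast; ring
  by_cases hklt : m < 6 * data.length
  · have hq6 : m / 6 < data.length := by omega
    have hget : PySem.List.pyGetD bits (m : Int) 0 = bits[m]'(by omega) := by
      rw [PySem.List.pyGetD_eq_getElem _ _ (by positivity) (by rw [hbl]; push_cast; omega)]
      simp
    have hfl : bits[m]'(by omega) =
        PySem.Int.band ((((data[m / 6]'hq6).toNat : Int) - 63) >>> (((5 - m % 6 : Nat) : Int))) 1 := by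
      have := pv_flatMap_getElem? (fun ch => pvBlock ((ch.toNat : Int) - 63)) (fun _ => rfl) data m
      have h1 : bits[m]? = some (PySem.Int.band ((((data[m / 6]'hq6).toNat : Int) - 63) >>> (((5 - m % 6 : Nat) : Int))) 1) := by
        rw [hbitsdef, pvBits, this, List.getElem?_eq_getElem hq6]
        simp only [Option.bind_some]
        rw [List.getElem?_eq_getElem (by simp [pvBlock]; omega : m % 6 < (pvBlock (((data[m/6]'hq6).toNat : Int) - 63)).length)]
        rw [pvBlock_getElem _ _ (Nat.mod_lt _ (by norm_num))]
      have h2 : bits[m]? = some (bits[m]'(by omega)) := List.getElem?_eq_getElem _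
      rw [h2] at h1
      exact Option.some_injective _ h1
    have hB : PySem.List.pyGetD (data.map (fun ch => (ch.toNat : Int))) (PySem.Int.floordiv (m : Int) 6) 0
        = ((data[m / 6]'hq6).toNat : Int) := by
      rw [show PySem.Int.floordiv (m : Int) 6 = ((m / 6 : Nat) : Int) from
        (by exact_mod_cast PySem.Int.floordiv_natCast m 6)]
      rw [PySem.List.pyGetD_eq_getElem _ _ (by positivity) (by simp; exact_mod_cast hq6)]
      have hdiv : ((m : Int) / 6).toNat = m / 6 := by omega
      simp [hdiv]
    have hmod : (((5 : Int) - PySem.Int.mod (m : Int) 6).toNat : Nat) = 5 - m % 6 := by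
      rw [show PySem.Int.mod (m : Int) 6 = ((m % 6 : Nat) : Int) from
        (by exact_mod_cast PySem.Int.mod_natCast m 6)]
      have : m % 6 < 6 := Nat.mod_lt _ (by norm_num)
      omega
    rw [hget, hfl, hB, hmod, hlen, Int.shiftRight_natCast_right]
  · constructor <;> (rintro ⟨h1, -⟩; exfalso)
    · rw [hlen] at h1; omega
    · omega

theorem pv_bit_eq (data : List Char) (u v : Nat) (huv : u < v) :
    pvBit data (u : Int) (v : Int) = pvE (pvBits data) u v := by
  unfold pvBit
  have hk : PySem.Int.floordiv ((v : Int) * ((v : Int) - 1)) 2 + (u : Int)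
      = ((pvT v + u : Nat) : Int) := by
    have h1 : ((v : Int) * ((v : Int) - 1)) = ((v * (v - 1) : Nat) : Int) := by
      have : 1 ≤ v := by omega
      push_cast [Nat.cast_sub this]
      ring
    rw [h1, show PySem.Int.floordiv ((v * (v - 1) : Nat) : Int) 2 = ((v * (v - 1) / 2 : Nat) : Int) from
      (by exact_mod_cast PySem.Int.floordiv_natCast (v * (v - 1)) 2)]
    unfold pvT
    push_cast
    ring
  simp only [hk]
  unfold pvE pvEK
  rw [← Bool.decide_and]
  exact decide_eq_decide.mpr (pv_cond data (pvT v + u)).symm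

theorem pv_pyRange_zero_cast (n : Int) :
    PySem.List.pyRange 0 n 1 = (List.range n.toNat).map (fun k : Nat => (k : Int)) := by
  rw [PySem.List.pyRange_one]
  simp

theorem pv_pairs_cast (n : Int) :
    (PySem.List.pyRange 0 n 1).flatMap (fun j => (PySem.List.pyRange 0 j 1).map (fun i => (i, j)))
      = (pvPairs n.toNat).map (fun p => ((p.1 : Int), (p.2 : Int))) := by
  rw [pv_pyRange_zero_cast, List.flatMap_map, pvPairs, List.map_flatMap]
  rw [List.flatMap_def, List.flatMap_def]
  apply congrArg List.flatten
  apply List.map_congr_left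
  intro j hj
  show (PySem.List.pyRange 0 (j : Int) 1).map (fun i => (i, (j : Int)))
      = ((List.range j).map (fun i : Nat => (i, j))).map (fun p => ((p.1 : Int), (p.2 : Int)))
  rw [pv_pyRange_zero_cast, Int.toNat_natCast, List.map_map, List.map_map]
  rfl

theorem graph6_to_adj_spec' (s : String) (hpre : (PySem.Str.strip s).toList ≠ []) :
    graph6_to_adj s = graph6_to_adj_alt s := by
  unfold graph6_to_adj graph6_to_adj_alt
  cases hs : (PySem.Str.strip s).toList with
  | nil => exact absurd hs hpre
  | cons c0 data =>
    simp only []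
    set n : Int := (c0.toNat : Int) - 63 with hn
    set N : Nat := n.toNat with hN
    -- 1. A's bit list is pvBits data
    have hrange : PySem.List.pyRange 5 (-1) (-1) = [5, 4, 3, 2, 1, 0] := by decide
    have hbits : data.foldl (fun bits ch =>
        let val : Int := (ch.toNat : Int) - 63
        (PySem.List.pyRange 5 (-1) (-1)).foldl
          (fun bs b => bs ++ [PySem.Int.band (val >>> b.toNat) 1]) bits) []
        = pvBits data := by
      have hone : ∀ (acc : List Int) (ch : Char), (fun bits ch =>
          let val : Int := (ch.toNat : Int) - 63
          (PySem.List.pyRange 5 (-1) (-1)).foldl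
            (fun bs b => bs ++ [PySem.Int.band (val >>> b.toNat) 1]) bits) acc ch
          = acc ++ pvBlock ((ch.toNat : Int) - 63) := by
        intro acc ch
        simp only [hrange, List.foldl_cons, List.foldl_nil, pvBlock, List.append_assoc]
        rfl
      rw [PySem.List.foldl_congr_mem data _ _ [] (by intro acc ch _; exact hone acc ch)]
      simpa using PySem.List.foldl_append_eq_flatMap
        (g := fun ch => pvBlock ((ch.toNat : Int) - 63)) (l := data) (acc := [])
    rw [hbits]
    set bits : List Int := pvBits data with hbitsdef
    -- 2. flatten A's nested loop into a single fold of pvStepA over the pair list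
    have hstep : ∀ (st : List (List Int) × Int) (j : Int),
        (PySem.List.pyRange 0 j 1).foldl (fun (st : List (List Int) × Int) i =>
          let adj' := if st.2 < (bits.length : Int) ∧ PySem.List.pyGetD bits st.2 0 ≠ 0 then
              pvAppendAt (pvAppendAt st.1 i j) j i
            else st.1
          (adj', st.2 + 1)) st
        = ((PySem.List.pyRange 0 j 1).map (fun i => (i, j))).foldl (pvStepA bits) st := by
      intro st j
      rw [List.foldl_map]
      rfl
    have hpairsA : (PySem.List.pyRange 1 n 1).flatMap
        (fun j => (PySem.List.pyRange 0 j 1).map (fun i => (i, j)))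
        = (PySem.List.pyRange 0 n 1).flatMap
            (fun j => (PySem.List.pyRange 0 j 1).map (fun i => (i, j))) := by
      by_cases h1 : 1 ≤ n
      · rw [PySem.List.pyRange_one_cons (by omega : (0:Int) < n), List.flatMap_cons,
          PySem.List.pyRange_one_eq_nil (by omega : (0:Int) ≤ 0)]
        simp
      · rw [PySem.List.pyRange_one_eq_nil (by omega : n ≤ 1),
          PySem.List.pyRange_one_eq_nil (by omega : n ≤ 0)]
    have hnest : (PySem.List.pyRange 1 n 1).foldl (fun (st : List (List Int) × Int) j =>
        (PySem.List.pyRange 0 j 1).foldl (fun (st : List (List Int) × Int) i =>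
          let adj' := if st.2 < (bits.length : Int) ∧ PySem.List.pyGetD bits st.2 0 ≠ 0 then
              pvAppendAt (pvAppendAt st.1 i j) j i
            else st.1
          (adj', st.2 + 1)) st)
        ((PySem.List.pyRange 0 n 1).map (fun _ => ([] : List Int)), (0 : Int))
        = ((pvPairs N).map (fun p => ((p.1 : Int), (p.2 : Int)))).foldl (pvStepA bits)
            ((PySem.List.pyRange 0 n 1).map (fun _ => ([] : List Int)), (0 : Int)) := by
      rw [PySem.List.foldl_congr_mem _ _ _ _ (by intro st j _; exact hstep st j),
        ← List.foldl_flatMap, hpairsA, pv_pairs_cast]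
    rw [hnest]
    -- 3. the initial adjacency is (range N).map (const [])
    have hadj0 : (PySem.List.pyRange 0 n 1).map (fun _ => ([] : List Int))
        = (List.range N).map (fun _ => ([] : List Int)) := by
      rw [pv_pyRange_zero_cast, List.map_map]
      rfl
    rw [hadj0, pv_main bits N N (le_refl N)]
    -- 4. B's output, row by row
    rw [pv_pyRange_zero_cast, List.map_map]
    show (List.range N).map (pvGfun bits N) = _
    apply List.map_congr_left
    intro v hv
    have hvN : v < N := List.mem_range.mp hv
    have hnN : (N : Int) = n := Int.toNat_of_nonneg (by omega : 0 ≤ n)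
    simp only [Function.comp]
    rw [show pvGfun bits N v = pvSm bits v ++ pvLg bits v N from by
      unfold pvGfun; rw [if_pos hvN]]
    -- smaller neighbours
    have hsm : (PySem.List.pyRange 0 (v : Int) 1).filter (fun u => pvBit data u (v : Int))
        = pvSm bits v := by
      rw [pv_pyRange_zero_cast, Int.toNat_natCast, List.filter_map]
      unfold pvSm
      rw [List.filter_congr (fun u hu => by
        show pvBit data (u : Int) (v : Int) = pvE bits u v
        exact pv_bit_eq data u v (List.mem_range.mp hu))]
    -- larger neighbours
    have hlg : (PySem.List.pyRange ((v : Int) + 1) n 1).filter (fun w => pvBit data (v : Int) w)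
        = pvLg bits v N := by
      rw [PySem.List.pyRange_one]
      have hm : (n - ((v : Int) + 1)).toNat = N - (v + 1) := by omega
      rw [hm]
      have hfun : (fun k : Nat => ((v : Int) + 1 + (k : Int)))
          = (fun k : Nat => ((v + 1 + k : Nat) : Int)) := by
        funext k; push_cast; ring
      rw [show (List.map (fun k : Nat => (v : Int) + 1 + (k : Int)) (List.range (N - (v + 1))))
          = (List.range (N - (v + 1))).map (fun k : Nat => ((v + 1 + k : Nat) : Int)) from by
        rw [hfun]]
      rw [List.filter_map]
      unfold pvLg
      rw [List.range'_eq_map_range, List.filter_map, List.map_map]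
      rw [List.filter_congr (fun k hk => by
        show pvBit data (v : Int) ((v + 1 + k : Nat) : Int) = pvE bits v (v + 1 + k)
        exact pv_bit_eq data v (v + 1 + k) (by omega))]
      rfl
    rw [hsm, hlg]

-- ===== VERDICT (by name: the statement is the Claim_ definition above) =====
theorem graph6_to_adj_spec : Claim_equal_graph6_to_adj := by
  intro s _ hpre
  exact graph6_to_adj_spec' s hpre
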